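-- pv_equiv track=rewrite | github.com/Dr-bin/AITESTFLOW | src/validator.py | _strip_make_request_definitions
-- ===== SOURCE A (Python) =====
-- from typing import Any, Dict, List, Optional
--
-- def _strip_make_request_definitions(code: str) -> str:
--     """Remove top-level make_request definitions so the validator stub takes effect."""
--     lines = code.splitlines(keepends=True)
--     out: List[str] = []
--     i = 0
--     while i < len(lines):
--         line = lines[i]
--         if line.startswith("def make_request"):
--             i += 1
--             while i < len(lines):
--                 n = lines[i]
--                 if n.strip() == "":
--                     i += 1
--                     continue
--                 if not (n.startswith(" ") or n.startswith("\t")):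
--                     break
--                 i += 1
--             continue
--         out.append(line)
--         i += 1
--     return "".join(out)
-- ===== SOURCE B (Python) =====
-- def _strip_make_request_definitions(code: str) -> str:
--     """Remove top-level make_request definitions so the validator stub takes effect."""
--     lines = code.splitlines(keepends=True)
--     blocks = []
--     cur = []
--     for line in lines:
--         if cur and (line.strip() == "" or line.startswith((" ", "\t"))):
--             cur.append(line)
--         else:
--             if cur:
--                 blocks.append(cur)
--             cur = [line]
--     if cur:
--         blocks.append(cur)
--     return "".join(
--         l for b in blocks if not b[0].startswith("def make_request") for l in b
--     )
-- ===== Notes on version B (the rewrite author's own statement) =====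
-- stated objective: alternative
-- what changed: B replaces A's index-driven scan with a nested inner skip-loop by a single grouping pass that partitions the lines into top-level blocks (a block = a leader line plus its blank/indented continuation lines) and then filters out whole blocks whose leader is a top-level make_request def.
import Mathlib
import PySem

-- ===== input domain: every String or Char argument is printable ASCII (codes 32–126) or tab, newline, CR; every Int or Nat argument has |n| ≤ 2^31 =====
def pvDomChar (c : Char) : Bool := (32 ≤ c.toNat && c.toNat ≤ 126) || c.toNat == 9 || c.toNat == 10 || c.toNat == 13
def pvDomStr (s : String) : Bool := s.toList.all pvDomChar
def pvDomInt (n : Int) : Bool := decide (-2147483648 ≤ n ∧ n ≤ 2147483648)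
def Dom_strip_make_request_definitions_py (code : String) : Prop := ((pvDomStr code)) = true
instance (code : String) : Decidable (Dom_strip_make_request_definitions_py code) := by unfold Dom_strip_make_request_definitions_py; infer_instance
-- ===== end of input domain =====

-- B groups the lines into top-level blocks once and filters whole blocks, instead of A's
-- index-driven scan with a nested skip loop (objective: simpler; return value only).

-- ===== PORT A =====
-- hand port of str.splitlines(keepends=True): exact on the stated domain (printable ASCII
-- plus tab/newline/CR), where the only line boundaries are '\n', '\r' and '\r\n'.
def pvSplitKE : List Char → List Char → List (List Char)
  | acc, [] => if acc.isEmpty then [] else [acc.reverse]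
  | acc, '\r' :: '\n' :: rest => (acc.reverse ++ ['\r', '\n']) :: pvSplitKE [] rest
  | acc, '\r' :: rest => (acc.reverse ++ ['\r']) :: pvSplitKE [] rest
  | acc, '\n' :: rest => (acc.reverse ++ ['\n']) :: pvSplitKE [] rest
  | acc, c :: rest => pvSplitKE (c :: acc) rest

def pvPrefix : List Char := "def make_request".toList

-- inner `while` of A: consume blank lines, stop before the first non-blank top-level line
def pvSkip : List (List Char) → List (List Char)
  | [] => []
  | n :: rest =>
    if PySem.Chars.strip n == [] then pvSkip rest
    else if !(PySem.Chars.startswith n [' '] || PySem.Chars.startswith n ['\t']) then n :: rest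
    else pvSkip rest

theorem pvSkip_length_le (xs : List (List Char)) : (pvSkip xs).length ≤ xs.length := by
  induction xs with
  | nil => simp [pvSkip]
  | cons n rest ih =>
    simp only [pvSkip]
    split_ifs <;> simp <;> omega

-- outer `while` of A
def pvGo : List (List Char) → List (List Char)
  | [] => []
  | l :: rest =>
    if PySem.Chars.startswith l pvPrefix then pvGo (pvSkip rest)
    else l :: pvGo rest
termination_by xs => xs.length
decreasing_by
  · exact Nat.lt_succ_of_le (pvSkip_length_le rest)
  · simp

def strip_make_request_definitions_py (code : String) : String :=
  String.ofList (PySem.Chars.join [] (pvGo (pvSplitKE [] code.toList)))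

-- ===== PORT B =====
-- a line that continues the current block: blank, or indented by space/tab
def pvIsCont (line : List Char) : Bool :=
  PySem.Chars.strip line == [] || (PySem.Chars.startswith line [' '] || PySem.Chars.startswith line ['\t'])

-- one step of B's grouping loop over state (blocks, cur)
def pvStepB (st : List (List (List Char)) × List (List Char)) (line : List Char) :
    List (List (List Char)) × List (List Char) :=
  if !st.2.isEmpty && pvIsCont line then (st.1, st.2 ++ [line])
  else ((if st.2.isEmpty then st.1 else st.1 ++ [st.2]), [line])

def strip_make_request_definitions_py_alt (code : String) : String :=
  let lines := pvSplitKE [] code.toList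
  let st := lines.foldl pvStepB ([], [])
  let blocks := if st.2.isEmpty then st.1 else st.1 ++ [st.2]
  String.ofList (PySem.Chars.join []
    ((blocks.filter (fun b => !PySem.Chars.startswith (b.headD []) pvPrefix)).flatten))

-- ===== PRECONDITION & SPEC =====
def Spec_strip_make_request_definitions_py (code : String) (out : String) : Prop := out = strip_make_request_definitions_py_alt code
instance (code : String) (out : String) : Decidable (Spec_strip_make_request_definitions_py code out) := by unfold Spec_strip_make_request_definitions_py; infer_instance

-- ===== CLAIM (what is proved, stated in full; the proofs are below) =====
def Claim_equal_strip_make_request_definitions_py : Prop := ∀ (code : String), Dom_strip_make_request_definitions_py code → Spec_strip_make_request_definitions_py code (strip_make_request_definitions_py code)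

-- ===== LEMMAS AND PROOFS =====

-- the emitted contents of one finished block
def pvEmit (b : List (List Char)) : List (List Char) :=
  if PySem.Chars.startswith (b.headD []) pvPrefix then [] else b

def pvOut (st : List (List (List Char)) × List (List Char)) : List (List Char) :=
  ((if st.2.isEmpty then st.1 else st.1 ++ [st.2]).filter
    (fun b => !PySem.Chars.startswith (b.headD []) pvPrefix)).flatten

theorem pvOut_eq (st : List (List (List Char)) × List (List Char)) :
    pvOut st = ((if st.2.isEmpty then st.1 else st.1 ++ [st.2]).map pvEmit).flatten := by
  unfold pvOut pvEmit
  generalize (if st.2.isEmpty then st.1 else st.1 ++ [st.2]) = bs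
  induction bs with
  | nil => simp
  | cons b rest ih =>
    rw [List.filter_cons, List.map_cons, List.flatten_cons, ← ih]
    cases h : PySem.Chars.startswith (b.headD []) pvPrefix <;> simp_all

-- the blocks-so-far component only grows by appending; it factors out of the fold
theorem pvFold_factor (lines : List (List Char)) (blocks : List (List (List Char)))
    (cur : List (List Char)) :
    lines.foldl pvStepB (blocks, cur)
      = (blocks ++ (lines.foldl pvStepB ([], cur)).1, (lines.foldl pvStepB ([], cur)).2) := by
  induction lines generalizing blocks cur with
  | nil => simp
  | cons l rest ih =>
    simp only [List.foldl_cons]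
    by_cases hc : (!cur.isEmpty && pvIsCont l) = true
    · have h1 : pvStepB (blocks, cur) l = (blocks, cur ++ [l]) := by simp [pvStepB, hc]
      have h2 : pvStepB (([] : List (List (List Char))), cur) l = ([], cur ++ [l]) := by
        simp [pvStepB, hc]
      rw [h1, h2, ih]
    · by_cases he : cur.isEmpty
      · have h1 : pvStepB (blocks, cur) l = (blocks, [l]) := by simp [pvStepB, he]
        have h2 : pvStepB (([] : List (List (List Char))), cur) l = ([], [l]) := by
          simp [pvStepB, he]
        rw [h1, h2, ih]
      · have hcl : pvIsCont l = false := by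
          cases hx : pvIsCont l
          · rfl
          · simp [hx, he] at hc
        have h1 : pvStepB (blocks, cur) l = (blocks ++ [cur], [l]) := by simp [pvStepB, hcl, he]
        have h2 : pvStepB (([] : List (List (List Char))), cur) l = ([cur], [l]) := by
          simp [pvStepB, hcl, he]
        rw [h1, h2, ih (blocks ++ [cur]) [l], ih [cur] [l]]
        simp

theorem pvIsCont_skip (l : List Char) (rest : List (List Char)) (h : pvIsCont l = true) :
    pvSkip (l :: rest) = pvSkip rest := by
  unfold pvIsCont at h
  simp only [pvSkip]
  rcases Bool.or_eq_true_iff.mp h with h1 | h2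
  · simp [h1]
  · split_ifs with hb hs
    · rfl
    · simp [h2] at hs
    · rfl

theorem pvIsCont_not_prefix (l : List Char) (h : pvIsCont l = true) :
    PySem.Chars.startswith l pvPrefix = false := by
  cases hx : PySem.Chars.startswith l pvPrefix
  · rfl
  · exfalso
    obtain ⟨t, ht⟩ := (PySem.Chars.startswith_iff l pvPrefix).mp hx
    have hl : l = 'd' :: ("ef make_request".toList ++ t) := by rw [← ht]; rfl
    unfold pvIsCont at h
    rcases Bool.or_eq_true_iff.mp h with h1 | h2
    · have hblank : PySem.Chars.strip l = [] := by simpa using h1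
      rw [hl] at hblank
      unfold PySem.Chars.strip PySem.Chars.lstrip at hblank
      rw [List.dropWhile_cons_of_neg (by decide)] at hblank
      unfold PySem.Chars.rstrip at hblank
      have hnil := List.reverse_eq_nil_iff.mp hblank
      have hall := List.dropWhile_eq_nil_iff.mp hnil
      have hd := hall 'd' (by simp)
      exact absurd hd (by decide)
    · rcases Bool.or_eq_true_iff.mp h2 with h3 | h3 <;>
      · obtain ⟨t', ht'⟩ := (PySem.Chars.startswith_iff l _).mp h3
        rw [hl] at ht'
        simp at ht'

theorem pvSkip_not_cont (l : List Char) (rest : List (List Char)) (h : pvIsCont l = false) :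
    pvSkip (l :: rest) = l :: rest := by
  unfold pvIsCont at h
  simp only [Bool.or_eq_false_iff] at h
  simp [pvSkip, h.1, h.2.1, h.2.2]

-- core invariant: processing the rest of the lines with a nonempty current block cur
theorem pvG_main (lines : List (List Char)) :
    ∀ cur : List (List Char), cur ≠ [] →
      pvOut (lines.foldl pvStepB ([], cur))
        = (if PySem.Chars.startswith (cur.headD []) pvPrefix then pvGo (pvSkip lines)
           else cur ++ pvGo lines) := by
  induction lines with
  | nil =>
    intro cur hcur
    have hne : cur.isEmpty = false := by simpa using hcur
    simp only [List.foldl_nil, pvOut_eq, hne, pvSkip, pvGo]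
    by_cases h : PySem.Chars.startswith (cur.headD []) pvPrefix = true <;>
      simp [pvEmit]
  | cons l rest ih =>
    intro cur hcur
    have hne : cur.isEmpty = false := by simpa using hcur
    simp only [List.foldl_cons]
    by_cases hc : pvIsCont l = true
    · -- continuation line: extend cur
      have hstep : pvStepB ([], cur) l = ([], cur ++ [l]) := by
        simp [pvStepB, hne, hc]
      rw [hstep, ih (cur ++ [l]) (by simp)]
      have hhead : (cur ++ [l]).headD [] = cur.headD [] := by
        cases cur with
        | nil => exact absurd rfl hcur
        | cons a b => simp
      rw [hhead, pvIsCont_skip l rest hc]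
      have hgo : pvGo (l :: rest) = l :: pvGo rest := by
        simp [pvGo, pvIsCont_not_prefix l hc]
      split_ifs <;> simp [hgo]
    · -- block boundary: close cur, start a new block [l]
      have hc' : pvIsCont l = false := by simpa using hc
      have hstep : pvStepB ([], cur) l = ([cur], [l]) := by
        simp [pvStepB, hne, hc']
      rw [hstep, pvFold_factor rest [cur] [l]]
      have hout : pvOut ([cur] ++ (rest.foldl pvStepB ([], [l])).1,
          (rest.foldl pvStepB ([], [l])).2)
          = pvEmit cur ++ pvOut (rest.foldl pvStepB ([], [l])) := by
        simp only [pvOut_eq]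
        split_ifs <;> simp
      rw [hout, ih [l] (by simp), pvSkip_not_cont l rest hc']
      have hgo : pvGo (l :: rest)
          = if PySem.Chars.startswith l pvPrefix then pvGo (pvSkip rest) else l :: pvGo rest := by
        simp [pvGo]
      rw [hgo]
      have hhl : (([l] : List (List Char)).headD ([] : List Char)) = l := rfl
      rw [hhl]
      cases cur with
      | nil => exact absurd rfl hcur
      | cons c0 cs =>
        by_cases h1 : PySem.Chars.startswith c0 pvPrefix = true <;>
          by_cases h2 : PySem.Chars.startswith l pvPrefix = true <;>
            simp [pvEmit, h1, h2]

theorem pv_lists_eq (lines : List (List Char)) :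
    pvOut (lines.foldl pvStepB ([], [])) = pvGo lines := by
  cases lines with
  | nil => simp [pvOut_eq, pvGo]
  | cons l rest =>
    have hstep : pvStepB ([], ([] : List (List Char))) l = ([], [l]) := by
      simp [pvStepB]
    simp only [List.foldl_cons, hstep]
    rw [pvG_main rest [l] (by simp)]
    simp only [List.headD]
    have hgo : pvGo (l :: rest)
        = if PySem.Chars.startswith l pvPrefix then pvGo (pvSkip rest) else l :: pvGo rest := by
      simp [pvGo]
    split_ifs with h1 <;> simp [hgo, h1]

-- ===== VERDICT (by name: the statement is the Claim_ definition above) =====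
theorem strip_make_request_definitions_py_spec : Claim_equal_strip_make_request_definitions_py := by
  intro code _
  unfold Spec_strip_make_request_definitions_py
  unfold strip_make_request_definitions_py strip_make_request_definitions_py_alt
  have := pv_lists_eq (pvSplitKE [] code.toList)
  simp only [pvOut] at this
  rw [← this]
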